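-- pv_equiv track=rewrite | github.com/glsalierno/quick-hazard-assessment-app | utils/toxvaldb_client.py | _categorize_study
-- ===== SOURCE A (Python) =====
-- def _categorize_study(study_type: str) -> str:
--     if any(x in study_type for x in ["ld50", "lc50", "acute", "lethal"]):
--         return "acute_toxicity"
--     if any(x in study_type for x in ["carcinogen", "cancer"]):
--         return "carcinogenicity"
--     if any(x in study_type for x in ["genotox", "mutagen", "ames"]):
--         return "genotoxicity"
--     if "repeat" in study_type and "dose" in study_type:
--         return "repeated_dose"
--     if "develop" in study_type:
--         return "developmental"
--     if "reproduc" in study_type: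
--         return "reproductive"
--     if "neuro" in study_type:
--         return "neurotoxicity"
--     if any(x in study_type for x in ["ecotox", "fish", "daphnia", "algae"]):
--         return "ecotoxicity"
--     return "other"
-- ===== SOURCE B (Python) =====
-- # B: instead of an early-return if-chain, compute the full set of matching
-- # categories in one pass over a flat keyword->category map (plus the one
-- # conjunctive rule), then pick the highest-priority matched category.
-- _KEYWORD_CAT = [
--     ("ld50", "acute_toxicity"), ("lc50", "acute_toxicity"),
--     ("acute", "acute_toxicity"), ("lethal", "acute_toxicity"),
--     ("carcinogen", "carcinogenicity"), ("cancer", "carcinogenicity"),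
--     ("genotox", "genotoxicity"), ("mutagen", "genotoxicity"),
--     ("ames", "genotoxicity"),
--     ("develop", "developmental"), ("reproduc", "reproductive"),
--     ("neuro", "neurotoxicity"),
--     ("ecotox", "ecotoxicity"), ("fish", "ecotoxicity"),
--     ("daphnia", "ecotoxicity"), ("algae", "ecotoxicity"),
-- ]
--
-- _PRIORITY = [
--     "acute_toxicity", "carcinogenicity", "genotoxicity", "repeated_dose",
--     "developmental", "reproductive", "neurotoxicity", "ecotoxicity",
-- ]
--
--
-- def _categorize_study(study_type: str) -> str:
--     hits = {cat for kw, cat in _KEYWORD_CAT if kw in study_type}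
--     if "repeat" in study_type and "dose" in study_type:
--         hits.add("repeated_dose")
--     for cat in _PRIORITY:
--         if cat in hits:
--             return cat
--     return "other"
-- ===== Notes on version B (the rewrite author's own statement) =====
-- stated objective: alternative
-- what changed: A short-circuits down an ordered if-chain returning on the first match; B computes the complete set of matching categories in one pass over a flat keyword-to-category map (plus the one conjunctive repeat+dose rule) and then returns the highest-priority category of that set.
import Mathlib
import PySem

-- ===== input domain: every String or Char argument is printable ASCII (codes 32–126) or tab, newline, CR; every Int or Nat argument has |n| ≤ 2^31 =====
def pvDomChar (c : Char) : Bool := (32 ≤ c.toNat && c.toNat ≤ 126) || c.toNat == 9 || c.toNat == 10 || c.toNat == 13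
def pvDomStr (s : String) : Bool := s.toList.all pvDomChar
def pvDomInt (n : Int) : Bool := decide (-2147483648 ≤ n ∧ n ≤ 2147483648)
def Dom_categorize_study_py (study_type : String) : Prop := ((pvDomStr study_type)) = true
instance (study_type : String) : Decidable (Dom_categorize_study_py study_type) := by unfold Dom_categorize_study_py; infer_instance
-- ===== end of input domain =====

-- B: instead of A's early-return if-chain, compute the set of ALL matching categories from a flat keyword->category map, then return the highest-priority one (alternative decomposition; same cost).
-- ===== PORT A =====
def categorize_study_py (study_type : String) : String :=
  if (["ld50", "lc50", "acute", "lethal"]).any (fun x => PySem.Str.isIn x study_type) then "acute_toxicity"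
  else if (["carcinogen", "cancer"]).any (fun x => PySem.Str.isIn x study_type) then "carcinogenicity"
  else if (["genotox", "mutagen", "ames"]).any (fun x => PySem.Str.isIn x study_type) then "genotoxicity"
  else if PySem.Str.isIn "repeat" study_type && PySem.Str.isIn "dose" study_type then "repeated_dose"
  else if PySem.Str.isIn "develop" study_type then "developmental"
  else if PySem.Str.isIn "reproduc" study_type then "reproductive"
  else if PySem.Str.isIn "neuro" study_type then "neurotoxicity"
  else if (["ecotox", "fish", "daphnia", "algae"]).any (fun x => PySem.Str.isIn x study_type) then "ecotoxicity"
  else "other"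

-- ===== PORT B =====
-- Source B's flat keyword -> category map (_KEYWORD_CAT)
def pvKeywordCat : List (String × String) :=
  [ ("ld50", "acute_toxicity"), ("lc50", "acute_toxicity"),
    ("acute", "acute_toxicity"), ("lethal", "acute_toxicity"),
    ("carcinogen", "carcinogenicity"), ("cancer", "carcinogenicity"),
    ("genotox", "genotoxicity"), ("mutagen", "genotoxicity"),
    ("ames", "genotoxicity"),
    ("develop", "developmental"), ("reproduc", "reproductive"),
    ("neuro", "neurotoxicity"),
    ("ecotox", "ecotoxicity"), ("fish", "ecotoxicity"),
    ("daphnia", "ecotoxicity"), ("algae", "ecotoxicity") ]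

-- Source B's priority order of categories (_PRIORITY)
def pvPriority : List String :=
  [ "acute_toxicity", "carcinogenicity", "genotoxicity", "repeated_dose",
    "developmental", "reproductive", "neurotoxicity", "ecotoxicity" ]

-- Source B's final loop: first category of the priority list present in the hit set, else "other"
def pvFirstHit (hits : PySem.Set String) : List String → String
  | [] => "other"
  | c :: rest => if PySem.Set.contains hits c then c else pvFirstHit hits rest

def categorize_study_py_alt (study_type : String) : String :=
  let hits : PySem.Set String :=
    PySem.Set.ofList ((pvKeywordCat.filter (fun p => PySem.Str.isIn p.1 study_type)).map Prod.snd)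
  let hits2 : PySem.Set String :=
    if PySem.Str.isIn "repeat" study_type && PySem.Str.isIn "dose" study_type then
      PySem.Set.add hits "repeated_dose"
    else hits
  pvFirstHit hits2 pvPriority

-- ===== PRECONDITION & SPEC =====
def Spec_categorize_study_py (study_type : String) (out : String) : Prop := out = categorize_study_py_alt study_type
instance (study_type : String) (out : String) : Decidable (Spec_categorize_study_py study_type out) := by unfold Spec_categorize_study_py; infer_instance

-- ===== CLAIM =====
def Claim_equal_categorize_study_py : Prop := ∀ (study_type : String), Dom_categorize_study_py study_type → Spec_categorize_study_py study_type (categorize_study_py study_type)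

-- ===== LEMMAS AND PROOFS =====

-- ===== VERDICT =====
theorem categorize_study_py_spec : Claim_equal_categorize_study_py := by
  intro s _
  unfold Spec_categorize_study_py categorize_study_py categorize_study_py_alt
  simp only [pvFirstHit, pvPriority]
  by_cases hr : (PySem.Str.isIn "repeat" s && PySem.Str.isIn "dose" s) = true
  · simp only [hr]
    simp [pvKeywordCat]
  · simp only [Bool.not_eq_true] at hr
    simp only [hr, Bool.false_eq_true]
    simp [pvKeywordCat]
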